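-- pv_equiv track=rewrite | github.com/chrisbrickey/useful_code | 2025-06-01_sorting.py | rob_bank
-- ===== SOURCE A (Python) =====
-- def create_flashback(nums):
--     results = [0] * len(nums)
--
--     stack = []
--     for i in range(len(nums) - 1, -1, -1):
--         while stack and nums[i] < nums[stack[-1]]:
--             popped_index = stack.pop()
--             day_diff = popped_index - i # moving from high to low indices
--             results[popped_index]  = day_diff
--
--         stack.append(i)
--     return results
--
-- def create_flashforward(nums):
--     results = [0] * len(nums)
--
--     stack = []
--     for i, num in enumerate(nums):
--         while stack and num < nums[stack[-1]]:
--             popped_index = stack.pop()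
--             day_diff = i - popped_index # moving from low to high indices
--             results[popped_index] = day_diff
--
--         stack.append(i)
--     return results
--
-- def rob_bank(guards, span):
--     flashback = create_flashback(guards)
--     flashforward = create_flashforward(guards)
--
--     good_days = []
--     for i, count in enumerate(guards):
--         # left_span, right_span = span, span
--
--         # bound check on i
--         if i - span < 0 or i + span >= len(guards):
--             continue
--         # if i - span < 0:
--         #     left_span = i
--         # if i + span >= len(guards):
--         #     right_span = len(guards) - 1 - i
--
--         # BUT... it's ok to look out of bounds on flashback and flashforward.
--         backward, forward = flashback[i], flashforward[i]
--         if (forward == 0 or forward >= span) and (backward == 0 or backward >= span):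
--             good_days.append(i)
--
--     return good_days
-- ===== SOURCE B (Python) =====
-- def rob_bank(guards, span):
--     n = len(guards)
--     good_days = []
--     for i in range(n):
--         if i - span < 0 or i + span >= n:
--             continue
--         if all(guards[j] >= guards[i] for j in range(i - span + 1, i)) and \
--            all(guards[j] >= guards[i] for j in range(i + 1, i + span)):
--             good_days.append(i)
--     return good_days
-- ===== Notes on version B (the rewrite author's own statement) =====
-- stated objective: simpler
-- what changed: Replaced both monotonic-stack nearest-smaller-distance passes (flashback/flashforward tables) by a direct window scan that, for each in-bounds index i, checks that all guards at distances 1..span-1 on each side are >= guards[i].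
import Mathlib
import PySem

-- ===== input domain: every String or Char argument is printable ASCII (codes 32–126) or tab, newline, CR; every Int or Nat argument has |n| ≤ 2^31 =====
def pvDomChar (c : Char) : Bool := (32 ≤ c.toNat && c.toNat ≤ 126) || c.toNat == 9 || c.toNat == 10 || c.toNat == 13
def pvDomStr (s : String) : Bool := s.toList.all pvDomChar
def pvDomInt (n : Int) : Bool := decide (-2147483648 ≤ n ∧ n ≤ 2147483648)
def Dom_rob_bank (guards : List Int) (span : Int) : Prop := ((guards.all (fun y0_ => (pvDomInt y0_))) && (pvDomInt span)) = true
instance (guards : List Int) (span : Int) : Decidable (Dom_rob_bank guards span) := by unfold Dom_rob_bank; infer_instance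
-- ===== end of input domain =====

-- B replaces A's two monotonic-stack nearest-smaller-distance tables by a direct window scan
-- over distances 1..span-1 on each side of every in-bounds index (simpler, no speed claim).

-- ===== PORT A =====
-- inner 'while stack and nums[i] < nums[stack[-1]]' loop of create_flashforward
-- (stack is kept head-first: Python's append/pop at the END is cons/uncons at the HEAD)
def ffInner (nums : List Int) (i : Nat) : List Nat → List Int → List Nat × List Int
  | [], res => ([], res)
  | p :: st, res =>
      if nums.getD i 0 < nums.getD p 0 then
        ffInner nums i st (res.set p ((i : Int) - (p : Int)))
      else (p :: st, res)

def ffStep (nums : List Int) (s : List Nat × List Int) (i : Nat) : List Nat × List Int :=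
  let t := ffInner nums i s.1 s.2
  (i :: t.1, t.2)

def create_flashforward (nums : List Int) : List Int :=
  ((List.range nums.length).foldl (ffStep nums) ([], List.replicate nums.length (0 : Int))).2

-- inner while loop of create_flashback (identical pop condition, mirrored day_diff)
def fbInner (nums : List Int) (i : Nat) : List Nat → List Int → List Nat × List Int
  | [], res => ([], res)
  | p :: st, res =>
      if nums.getD i 0 < nums.getD p 0 then
        fbInner nums i st (res.set p ((p : Int) - (i : Int)))
      else (p :: st, res)

def fbStep (nums : List Int) (s : List Nat × List Int) (i : Nat) : List Nat × List Int :=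
  let t := fbInner nums i s.1 s.2
  (i :: t.1, t.2)

-- 'for i in range(len(nums) - 1, -1, -1)' is the indices n-1 … 0, i.e. (List.range n).reverse
def create_flashback (nums : List Int) : List Int :=
  (((List.range nums.length).reverse).foldl (fbStep nums) ([], List.replicate nums.length (0 : Int))).2

def rob_bank (guards : List Int) (span : Int) : List Int :=
  let flashback := create_flashback guards
  let flashforward := create_flashforward guards
  (List.range guards.length).foldl (fun good_days (i : Nat) =>
    if (i : Int) - span < 0 ∨ (i : Int) + span ≥ (guards.length : Int) then good_days
    else
      let backward := flashback.getD i 0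
      let forward := flashforward.getD i 0
      if (forward = 0 ∨ forward ≥ span) ∧ (backward = 0 ∨ backward ≥ span) then
        good_days ++ [(i : Int)]
      else good_days) []

-- ===== PORT B =====
-- all(guards[j] >= guards[i] for j in range(a, b))
def windowAll (guards : List Int) (v : Int) (a b : Int) : Bool :=
  (PySem.List.pyRange a b 1).all (fun j => decide (v ≤ guards.getD j.toNat 0))

def rob_bank_alt (guards : List Int) (span : Int) : List Int :=
  (List.range guards.length).foldl (fun good_days (i : Nat) =>
    if (i : Int) - span < 0 ∨ (i : Int) + span ≥ (guards.length : Int) then good_days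
    else if windowAll guards (guards.getD i 0) ((i : Int) - span + 1) (i : Int)
          && windowAll guards (guards.getD i 0) ((i : Int) + 1) ((i : Int) + span) then
      good_days ++ [(i : Int)]
    else good_days) []

-- ===== PRECONDITION & SPEC =====
def Spec_rob_bank (guards : List Int) (span : Int) (out : List Int) : Prop := out = rob_bank_alt guards span
instance (guards : List Int) (span : Int) (out : List Int) : Decidable (Spec_rob_bank guards span out) := by unfold Spec_rob_bank; infer_instance

-- ===== CLAIM (what is proved, stated in full; the proofs are below) =====
def Claim_equal_rob_bank : Prop := ∀ (guards : List Int) (span : Int), Dom_rob_bank guards span → Spec_rob_bank guards span (rob_bank guards span)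

-- ===== LEMMAS AND PROOFS =====

-- Invariant of the flashforward pass after processing indices 0 … i-1.
def InvFF (nums : List Int) (i : Nat) (st : List Nat) (res : List Int) : Prop :=
  res.length = nums.length ∧
  (∀ j, j ∈ st ↔ (j < i ∧ ∀ l, j < l → l < i → nums.getD j 0 ≤ nums.getD l 0)) ∧
  List.Pairwise (· > ·) st ∧
  (∀ j, (∀ l, j < l → l < i → nums.getD j 0 ≤ nums.getD l 0) → res.getD j 0 = 0) ∧
  (∀ j l, j < l → l < i → nums.getD l 0 < nums.getD j 0 →
      (∀ l', j < l' → l' < l → nums.getD j 0 ≤ nums.getD l' 0) →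
      res.getD j 0 = (l : Int) - (j : Int))

-- Invariant of the flashback pass after processing indices n-1 … i.
def InvFB (nums : List Int) (i : Nat) (st : List Nat) (res : List Int) : Prop :=
  res.length = nums.length ∧
  (∀ j, j ∈ st ↔ (i ≤ j ∧ j < nums.length ∧ ∀ l, i ≤ l → l < j → nums.getD j 0 ≤ nums.getD l 0)) ∧
  List.Pairwise (· < ·) st ∧
  (∀ j, (∀ l, i ≤ l → l < j → nums.getD j 0 ≤ nums.getD l 0) → res.getD j 0 = 0) ∧
  (∀ j l, i ≤ l → l < j → j < nums.length → nums.getD l 0 < nums.getD j 0 →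
      (∀ l', l < l' → l' < j → nums.getD j 0 ≤ nums.getD l' 0) →
      res.getD j 0 = (j : Int) - (l : Int))

theorem ffInner_spec (nums : List Int) (i : Nat) :
    ∀ (st : List Nat) (res : List Int),
    (∀ j ∈ st, j < i) →
    List.Pairwise (· > ·) st →
    (∀ j ∈ st, ∀ k ∈ st, j < k → nums.getD j 0 ≤ nums.getD k 0) →
    (∀ j ∈ st, j < res.length) →
    (ffInner nums i st res).1 = st.filter (fun p => decide (nums.getD p 0 ≤ nums.getD i 0)) ∧
    (∀ j, (ffInner nums i st res).2.getD j 0 =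
       if j ∈ st ∧ nums.getD i 0 < nums.getD j 0 then (i : Int) - (j : Int) else res.getD j 0) ∧
    (ffInner nums i st res).2.length = res.length := by
  intro st
  induction st with
  | nil => intro res _ _ _ _; simp [ffInner]
  | cons p st' ih =>
    intro res hmem hpair hval hlen
    by_cases h : nums.getD i 0 < nums.getD p 0
    · have hp : p ∉ st' := fun hc => absurd (List.rel_of_pairwise_cons hpair hc) (lt_irrefl p)
      have hplen : p < res.length := hlen p List.mem_cons_self
      obtain ⟨ih1, ih2, ih3⟩ := ih (res.set p ((i : Int) - (p : Int)))
        (fun j hj => hmem j (List.mem_cons_of_mem _ hj)) hpair.of_cons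
        (fun j hj k hk => hval j (List.mem_cons_of_mem _ hj) k (List.mem_cons_of_mem _ hk))
        (by simpa using fun j hj => hlen j (List.mem_cons_of_mem _ hj))
      have he : ffInner nums i (p :: st') res
          = ffInner nums i st' (res.set p ((i : Int) - (p : Int))) := by
        show (if nums.getD i 0 < nums.getD p 0 then _ else _) = _
        rw [if_pos h]
      refine ⟨?_, ?_, ?_⟩
      · rw [he, ih1, List.filter_cons]
        have hnle : ¬ (nums.getD p 0 ≤ nums.getD i 0) := not_le.mpr h
        simp only [hnle, decide_false, Bool.false_eq_true, if_false]
      · intro j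
        rw [he, ih2 j]
        by_cases hj : j = p
        · subst hj
          rw [if_neg (fun hc => hp hc.1), if_pos ⟨List.mem_cons_self, h⟩]
          simp [List.getD, hplen]
        · have hsk : (res.set p ((i : Int) - (p : Int))).getD j 0 = res.getD j 0 := by
            simp [List.getD, List.getElem?_set_ne (fun hc => hj hc.symm)]
          rw [hsk]
          by_cases hjs : j ∈ st' ∧ nums.getD i 0 < nums.getD j 0
          · rw [if_pos hjs, if_pos ⟨List.mem_cons_of_mem _ hjs.1, hjs.2⟩]
          · rw [if_neg hjs, if_neg (fun hc => hjs ⟨(List.mem_cons.mp hc.1).resolve_left hj, hc.2⟩)]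
      · rw [he, ih3]; simp
    · have he : ffInner nums i (p :: st') res = (p :: st', res) := by
        show (if nums.getD i 0 < nums.getD p 0 then _ else _) = _
        rw [if_neg h]
      have hple : nums.getD p 0 ≤ nums.getD i 0 := le_of_not_gt h
      refine ⟨?_, ?_, by rw [he]⟩
      · rw [he, List.filter_cons]
        simp only [hple, decide_true, if_pos]
        rw [List.filter_eq_self.mpr]
        intro k hk
        exact decide_eq_true ((hval k (List.mem_cons_of_mem _ hk) p List.mem_cons_self
          (List.rel_of_pairwise_cons hpair hk)).trans hple)
      · intro j
        rw [he, if_neg]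
        rintro ⟨hjm, hjlt⟩
        rcases List.mem_cons.mp hjm with rfl | hjm'
        · exact absurd hjlt (not_lt.mpr hple)
        · exact absurd hjlt (not_lt.mpr ((hval j (List.mem_cons_of_mem _ hjm') p List.mem_cons_self
            (List.rel_of_pairwise_cons hpair hjm')).trans hple))

theorem fbInner_spec (nums : List Int) (i : Nat) :
    ∀ (st : List Nat) (res : List Int),
    (∀ j ∈ st, i < j) →
    List.Pairwise (· < ·) st →
    (∀ j ∈ st, ∀ k ∈ st, j < k → nums.getD k 0 ≤ nums.getD j 0) →
    (∀ j ∈ st, j < res.length) →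
    (fbInner nums i st res).1 = st.filter (fun p => decide (nums.getD p 0 ≤ nums.getD i 0)) ∧
    (∀ j, (fbInner nums i st res).2.getD j 0 =
       if j ∈ st ∧ nums.getD i 0 < nums.getD j 0 then (j : Int) - (i : Int) else res.getD j 0) ∧
    (fbInner nums i st res).2.length = res.length := by
  intro st
  induction st with
  | nil => intro res _ _ _ _; simp [fbInner]
  | cons p st' ih =>
    intro res hmem hpair hval hlen
    by_cases h : nums.getD i 0 < nums.getD p 0
    · have hp : p ∉ st' := fun hc => absurd (List.rel_of_pairwise_cons hpair hc) (lt_irrefl p)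
      have hplen : p < res.length := hlen p List.mem_cons_self
      obtain ⟨ih1, ih2, ih3⟩ := ih (res.set p ((p : Int) - (i : Int)))
        (fun j hj => hmem j (List.mem_cons_of_mem _ hj)) hpair.of_cons
        (fun j hj k hk => hval j (List.mem_cons_of_mem _ hj) k (List.mem_cons_of_mem _ hk))
        (by simpa using fun j hj => hlen j (List.mem_cons_of_mem _ hj))
      have he : fbInner nums i (p :: st') res
          = fbInner nums i st' (res.set p ((p : Int) - (i : Int))) := by
        show (if nums.getD i 0 < nums.getD p 0 then _ else _) = _
        rw [if_pos h]
      refine ⟨?_, ?_, ?_⟩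
      · rw [he, ih1, List.filter_cons]
        have hnle : ¬ (nums.getD p 0 ≤ nums.getD i 0) := not_le.mpr h
        simp only [hnle, decide_false, Bool.false_eq_true, if_false]
      · intro j
        rw [he, ih2 j]
        by_cases hj : j = p
        · subst hj
          rw [if_neg (fun hc => hp hc.1), if_pos ⟨List.mem_cons_self, h⟩]
          simp [List.getD, hplen]
        · have hsk : (res.set p ((p : Int) - (i : Int))).getD j 0 = res.getD j 0 := by
            simp [List.getD, List.getElem?_set_ne (fun hc => hj hc.symm)]
          rw [hsk]
          by_cases hjs : j ∈ st' ∧ nums.getD i 0 < nums.getD j 0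
          · rw [if_pos hjs, if_pos ⟨List.mem_cons_of_mem _ hjs.1, hjs.2⟩]
          · rw [if_neg hjs, if_neg (fun hc => hjs ⟨(List.mem_cons.mp hc.1).resolve_left hj, hc.2⟩)]
      · rw [he, ih3]; simp
    · have he : fbInner nums i (p :: st') res = (p :: st', res) := by
        show (if nums.getD i 0 < nums.getD p 0 then _ else _) = _
        rw [if_neg h]
      have hple : nums.getD p 0 ≤ nums.getD i 0 := le_of_not_gt h
      refine ⟨?_, ?_, by rw [he]⟩
      · rw [he, List.filter_cons]
        simp only [hple, decide_true, if_pos]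
        rw [List.filter_eq_self.mpr]
        intro k hk
        exact decide_eq_true ((hval p List.mem_cons_self k (List.mem_cons_of_mem _ hk)
          (List.rel_of_pairwise_cons hpair hk)).trans hple)
      · intro j
        rw [he, if_neg]
        rintro ⟨hjm, hjlt⟩
        rcases List.mem_cons.mp hjm with rfl | hjm'
        · exact absurd hjlt (not_lt.mpr hple)
        · exact absurd hjlt (not_lt.mpr ((hval p List.mem_cons_self j (List.mem_cons_of_mem _ hjm')
            (List.rel_of_pairwise_cons hpair hjm')).trans hple))

theorem InvFF_step (nums : List Int) (i : Nat) (s : List Nat × List Int)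
    (hi : i < nums.length) (h : InvFF nums i s.1 s.2) :
    InvFF nums (i + 1) (ffStep nums s i).1 (ffStep nums s i).2 := by
  obtain ⟨hL, hM, hP, hA, hB⟩ := h
  have hmem : ∀ j ∈ s.1, j < i := fun j hj => ((hM j).1 hj).1
  have hval : ∀ j ∈ s.1, ∀ k ∈ s.1, j < k → nums.getD j 0 ≤ nums.getD k 0 :=
    fun j hj k hk hjk => ((hM j).1 hj).2 k hjk ((hM k).1 hk).1
  have hlen : ∀ j ∈ s.1, j < s.2.length := fun j hj => hL ▸ (hmem j hj).trans hi
  obtain ⟨e1, e2, e3⟩ := ffInner_spec nums i s.1 s.2 hmem hP hval hlen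
  show InvFF nums (i + 1) (i :: (ffInner nums i s.1 s.2).1) ((ffInner nums i s.1 s.2).2)
  refine ⟨e3.trans hL, ?_, ?_, ?_, ?_⟩
  · intro j
    constructor
    · intro hj
      rcases List.mem_cons.mp hj with rfl | hj'
      · exact ⟨Nat.lt_succ_self j, fun l h1 h2 => absurd (h1.trans_le (Nat.lt_succ_iff.mp h2)) (lt_irrefl j)⟩
      · rw [e1] at hj'
        have hjs := List.mem_filter.mp hj'
        have hm := (hM j).1 hjs.1
        refine ⟨hm.1.trans (Nat.lt_succ_self i), fun l h1 h2 => ?_⟩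
        rcases Nat.lt_succ_iff_lt_or_eq.mp h2 with h2' | rfl
        · exact hm.2 l h1 h2'
        · exact of_decide_eq_true hjs.2
    · rintro ⟨hji, hcond⟩
      rcases Nat.lt_succ_iff_lt_or_eq.mp hji with hji' | rfl
      · refine List.mem_cons_of_mem _ ?_
        rw [e1]
        exact List.mem_filter.mpr ⟨(hM j).2 ⟨hji', fun l h1 h2 => hcond l h1 (h2.trans (Nat.lt_succ_self i))⟩,
          decide_eq_true (hcond i hji' (Nat.lt_succ_self i))⟩
      · exact List.mem_cons_self
  · refine List.pairwise_cons.mpr ⟨?_, ?_⟩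
    · intro j hj
      rw [e1] at hj
      exact hmem j (List.mem_filter.mp hj).1
    · rw [e1]; exact hP.filter _
  · intro j hcond
    rw [e2 j, if_neg, hA j (fun l h1 h2 => hcond l h1 (h2.trans (Nat.lt_succ_self i)))]
    rintro ⟨hjm, hjlt⟩
    exact absurd (hcond i (hmem j hjm) (Nat.lt_succ_self i)) (not_le.mpr hjlt)
  · intro j l hjl hli hsm hmin
    rw [e2 j]
    rcases Nat.lt_succ_iff_lt_or_eq.mp hli with hli' | rfl
    · rw [if_neg, hB j l hjl hli' hsm hmin]
      rintro ⟨hjm, _⟩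
      exact absurd (((hM j).1 hjm).2 l hjl hli') (not_le.mpr hsm)
    · rw [if_pos ⟨(hM j).2 ⟨hjl, fun l' h1 h2 => hmin l' h1 h2⟩, hsm⟩]

theorem InvFB_step (nums : List Int) (i : Nat) (s : List Nat × List Int)
    (hi : i < nums.length) (h : InvFB nums (i + 1) s.1 s.2) :
    InvFB nums i (fbStep nums s i).1 (fbStep nums s i).2 := by
  obtain ⟨hL, hM, hP, hA, hB⟩ := h
  have hmem : ∀ j ∈ s.1, i < j := fun j hj => ((hM j).1 hj).1
  have hval : ∀ j ∈ s.1, ∀ k ∈ s.1, j < k → nums.getD k 0 ≤ nums.getD j 0 :=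
    fun j hj k hk hjk => ((hM k).1 hk).2.2 j ((hM j).1 hj).1 hjk
  have hlen : ∀ j ∈ s.1, j < s.2.length := fun j hj => hL ▸ ((hM j).1 hj).2.1
  obtain ⟨e1, e2, e3⟩ := fbInner_spec nums i s.1 s.2 hmem hP hval hlen
  show InvFB nums i (i :: (fbInner nums i s.1 s.2).1) ((fbInner nums i s.1 s.2).2)
  refine ⟨e3.trans hL, ?_, ?_, ?_, ?_⟩
  · intro j
    constructor
    · intro hj
      rcases List.mem_cons.mp hj with rfl | hj'
      · exact ⟨le_refl j, hi, fun l h1 h2 => absurd (h1.trans_lt h2) (lt_irrefl j)⟩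
      · rw [e1] at hj'
        have hjs := List.mem_filter.mp hj'
        have hm := (hM j).1 hjs.1
        refine ⟨(Nat.le_succ i).trans hm.1, hm.2.1, fun l h1 h2 => ?_⟩
        rcases Nat.eq_or_lt_of_le h1 with rfl | h1'
        · exact of_decide_eq_true hjs.2
        · exact hm.2.2 l h1' h2
    · rintro ⟨hij, hjn, hcond⟩
      rcases Nat.eq_or_lt_of_le hij with rfl | hij'
      · exact List.mem_cons_self
      · refine List.mem_cons_of_mem _ ?_
        rw [e1]
        exact List.mem_filter.mpr ⟨(hM j).2 ⟨hij', hjn, fun l h1 h2 => hcond l ((Nat.le_succ i).trans h1) h2⟩,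
          decide_eq_true (hcond i (le_refl i) hij')⟩
  · refine List.pairwise_cons.mpr ⟨?_, ?_⟩
    · intro j hj
      rw [e1] at hj
      exact hmem j (List.mem_filter.mp hj).1
    · rw [e1]; exact hP.filter _
  · intro j hcond
    rw [e2 j, if_neg, hA j (fun l h1 h2 => hcond l ((Nat.le_succ i).trans h1) h2)]
    rintro ⟨hjm, hjlt⟩
    exact absurd (hcond i (le_refl i) (hmem j hjm)) (not_le.mpr hjlt)
  · intro j l hil hlj hjn hsm hmin
    rw [e2 j]
    rcases Nat.eq_or_lt_of_le hil with rfl | hil'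
    · rw [if_pos ⟨(hM j).2 ⟨hlj, hjn, fun l' h1 h2 => hmin l' h1 h2⟩, hsm⟩]
    · rw [if_neg, hB j l hil' hlj hjn hsm hmin]
      rintro ⟨hjm, _⟩
      exact absurd (((hM j).1 hjm).2.2 l hil' hlj) (not_le.mpr hsm)

theorem InvFF_init (nums : List Int) :
    InvFF nums 0 [] (List.replicate nums.length (0 : Int)) := by
  refine ⟨by simp, fun j => ⟨fun h => absurd h (List.not_mem_nil), fun h => absurd h.1 (Nat.not_lt_zero j)⟩,
    List.Pairwise.nil, ?_, by omega⟩
  intro j _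
  simp [List.getD, List.getElem?_replicate]
  split <;> simp

theorem ff_loop (nums : List Int) : ∀ k, k ≤ nums.length →
    InvFF nums k (((List.range k).foldl (ffStep nums) ([], List.replicate nums.length (0 : Int))).1)
      (((List.range k).foldl (ffStep nums) ([], List.replicate nums.length (0 : Int))).2) := by
  intro k
  induction k with
  | zero => intro _; exact InvFF_init nums
  | succ k ih =>
    intro hk
    rw [List.range_succ, List.foldl_append, List.foldl_cons, List.foldl_nil]
    exact InvFF_step nums k _ (Nat.lt_of_succ_le hk) (ih (Nat.le_of_succ_le hk))

theorem ff_char (nums : List Int) :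
    InvFF nums nums.length
      ((List.range nums.length).foldl (ffStep nums) ([], List.replicate nums.length (0 : Int))).1
      (create_flashforward nums) :=
  ff_loop nums nums.length (le_refl _)

theorem InvFB_init (nums : List Int) :
    InvFB nums nums.length [] (List.replicate nums.length (0 : Int)) := by
  refine ⟨by simp, fun j => ⟨fun h => absurd h (List.not_mem_nil), fun h => absurd h.2.1 (by omega)⟩,
    List.Pairwise.nil, ?_, by omega⟩
  intro j _
  simp [List.getD, List.getElem?_replicate]
  split <;> simp

theorem downFrom_eq (n i : Nat) (h : i < n) :
    (List.range' i (n - i)).reverse = (List.range' (i + 1) (n - (i + 1))).reverse ++ [i] := by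
  have : n - i = (n - (i + 1)) + 1 := by omega
  rw [this, List.range'_succ, List.reverse_cons]

theorem fb_loop (nums : List Int) : ∀ d i, i ≤ nums.length → nums.length - i = d →
    InvFB nums i
      (((List.range' i (nums.length - i)).reverse.foldl (fbStep nums) ([], List.replicate nums.length (0 : Int))).1)
      (((List.range' i (nums.length - i)).reverse.foldl (fbStep nums) ([], List.replicate nums.length (0 : Int))).2) := by
  intro d
  induction d with
  | zero =>
    intro i hle hd
    have : i = nums.length := by omega
    subst this
    simp only [Nat.sub_self, List.range'_zero, List.reverse_nil, List.foldl_nil]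
    exact InvFB_init nums
  | succ d ih =>
    intro i hle hd
    have hi : i < nums.length := by omega
    rw [downFrom_eq nums.length i hi, List.foldl_append, List.foldl_cons, List.foldl_nil]
    exact InvFB_step nums i _ hi (ih (i + 1) hi (by omega))

theorem fb_char (nums : List Int) :
    InvFB nums 0
      (((List.range nums.length).reverse.foldl (fbStep nums) ([], List.replicate nums.length (0 : Int))).1)
      (create_flashback nums) := by
  have := fb_loop nums nums.length 0 (Nat.zero_le _) rfl
  rw [Nat.sub_zero, ← List.range_eq_range'] at this
  exact this

-- A's forward/backward distance conditions equal B's window checks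
theorem windowAll_iff (nums : List Int) (v : Int) (a b : Int) :
    windowAll nums v a b = true ↔ ∀ x : Int, a ≤ x → x < b → v ≤ nums.getD x.toNat 0 := by
  simp [windowAll, List.all_eq_true, PySem.List.mem_pyRange_one]

theorem forward_window (nums : List Int) (span : Int) (i : Nat)
    (hn : (i : Int) + span < (nums.length : Int)) :
    ((create_flashforward nums).getD i 0 = 0 ∨ (create_flashforward nums).getD i 0 ≥ span) ↔
    windowAll nums (nums.getD i 0) ((i : Int) + 1) ((i : Int) + span) = true := by
  obtain ⟨-, -, -, hA, hB⟩ := ff_char nums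
  rw [windowAll_iff]
  by_cases hE : ∃ l : Nat, i < l ∧ l < nums.length ∧ nums.getD l 0 < nums.getD i 0
  · have hP := Nat.find_spec hE
    set l0 := Nat.find hE with hl0
    have hmin : ∀ l', i < l' → l' < l0 → nums.getD i 0 ≤ nums.getD l' 0 := fun l' h1 h2 =>
      le_of_not_gt (fun hc => Nat.find_min hE h2 ⟨h1, h2.trans hP.2.1, hc⟩)
    have hv : (create_flashforward nums).getD i 0 = (l0 : Int) - (i : Int) :=
      hB i l0 hP.1 hP.2.1 hP.2.2 hmin
    rw [hv]
    constructor
    · intro hc x hx1 hx2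
      have hil0 : i < l0 := hP.1
      have hspan : (i : Int) + span ≤ (l0 : Int) := by
        rcases hc with h0 | hge
        · exfalso; omega
        · omega
      have hx : i < x.toNat ∧ x.toNat < l0 := by omega
      exact hmin x.toNat hx.1 hx.2
    · intro hw
      right
      by_contra hlt
      push Not at hlt
      have hil0 : i < l0 := hP.1
      have := hw (l0 : Int) (by omega) (by omega)
      simp only [Int.toNat_natCast] at this
      exact absurd hP.2.2 (not_lt.mpr this)
  · push Not at hE
    rw [hA i (fun l h1 h2 => hE l h1 h2)]
    constructor
    · intro _ x hx1 hx2
      exact hE x.toNat (by omega) (by omega)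
    · intro _; left; rfl

theorem backward_window (nums : List Int) (span : Int) (i : Nat)
    (hs : span ≤ (i : Int)) (hin : i < nums.length) :
    ((create_flashback nums).getD i 0 = 0 ∨ (create_flashback nums).getD i 0 ≥ span) ↔
    windowAll nums (nums.getD i 0) ((i : Int) - span + 1) (i : Int) = true := by
  obtain ⟨-, -, -, hA, hB⟩ := fb_char nums
  rw [windowAll_iff]
  by_cases hE : ∃ l : Nat, l < i ∧ nums.getD l 0 < nums.getD i 0
  · obtain ⟨m, hm⟩ := hE
    have hPl0 : (Nat.findGreatest (fun l => l < i ∧ nums.getD l 0 < nums.getD i 0) i) < i ∧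
        nums.getD (Nat.findGreatest (fun l => l < i ∧ nums.getD l 0 < nums.getD i 0) i) 0 < nums.getD i 0 :=
      Nat.findGreatest_spec (P := fun l => l < i ∧ nums.getD l 0 < nums.getD i 0) (le_of_lt hm.1) hm
    set l0 := Nat.findGreatest (fun l => l < i ∧ nums.getD l 0 < nums.getD i 0) i with hl0
    have hmax : ∀ l', l0 < l' → l' < i → nums.getD i 0 ≤ nums.getD l' 0 := fun l' h1 h2 =>
      le_of_not_gt (fun hc => Nat.findGreatest_is_greatest h1 (le_of_lt h2) ⟨h2, hc⟩)
    have hv : (create_flashback nums).getD i 0 = (i : Int) - (l0 : Int) :=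
      hB i l0 (Nat.zero_le _) hPl0.1 hin hPl0.2 hmax
    rw [hv]
    constructor
    · intro hc x hx1 hx2
      have hl0i : l0 < i := hPl0.1
      have hspan : (l0 : Int) ≤ (i : Int) - span := by
        rcases hc with h0 | hge
        · exfalso; omega
        · omega
      have hx : l0 < x.toNat ∧ x.toNat < i := by omega
      exact hmax x.toNat hx.1 hx.2
    · intro hw
      right
      by_contra hlt
      push Not at hlt
      have hl0i : l0 < i := hPl0.1
      have := hw (l0 : Int) (by omega) (by omega)
      simp only [Int.toNat_natCast] at this
      exact absurd hPl0.2 (not_lt.mpr this)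
  · push Not at hE
    rw [hA i (fun l _ h2 => hE l h2)]
    constructor
    · intro _ x hx1 hx2
      exact hE x.toNat (by omega)
    · intro _; left; rfl

-- ===== VERDICT (by name: the statement is the Claim_ definition above) =====
theorem rob_bank_spec : Claim_equal_rob_bank := by
  intro guards span _
  unfold Spec_rob_bank rob_bank rob_bank_alt
  apply PySem.List.foldl_congr_mem
  intro acc i hi
  have hin : i < guards.length := List.mem_range.mp hi
  by_cases hb : (i : Int) - span < 0 ∨ (i : Int) + span ≥ (guards.length : Int)
  · rw [if_pos hb, if_pos hb]
  · rw [if_neg hb, if_neg hb]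
    push Not at hb
    have hfw := forward_window guards span i hb.2
    have hbw := backward_window guards span i (by omega) hin
    have hcond : (((create_flashforward guards).getD i 0 = 0 ∨ (create_flashforward guards).getD i 0 ≥ span) ∧
        ((create_flashback guards).getD i 0 = 0 ∨ (create_flashback guards).getD i 0 ≥ span)) ↔
        (windowAll guards (guards.getD i 0) ((i : Int) - span + 1) (i : Int)
          && windowAll guards (guards.getD i 0) ((i : Int) + 1) ((i : Int) + span)) = true := by
      rw [Bool.and_eq_true]
      exact ⟨fun ⟨h1, h2⟩ => ⟨hbw.mp h2, hfw.mp h1⟩, fun ⟨h1, h2⟩ => ⟨hfw.mpr h2, hbw.mpr h1⟩⟩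
    by_cases hc : (windowAll guards (guards.getD i 0) ((i : Int) - span + 1) (i : Int)
          && windowAll guards (guards.getD i 0) ((i : Int) + 1) ((i : Int) + span)) = true
    · rw [if_pos (hcond.mpr hc), if_pos hc]
    · rw [if_neg (fun h => hc (hcond.mp h)), if_neg hc]
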